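-- pv_equiv track=rewrite | github.com/vldzvgntsv/ylab-hw | homework-1/task4.py | bananas
-- ===== SOURCE A (Python) =====
-- from itertools import combinations
--
-- def bananas(s):
--     result = set()
--     pattern = 'banana'
--     for combination in combinations(enumerate(s), 6):
--         word = ['-' for _ in range(len(s))]
--         j = 0
--         for i, letter in combination:
--             if letter == pattern[j]:
--                 word[i] = letter
--                 j += 1
--             else:
--                 break
--         if j == len(pattern):
--             result.add(''.join(word))
--     return result
-- ===== SOURCE B (Python) =====
-- def bananas(s):
--     pattern = 'banana'
--     items = list(enumerate(s))
--
--     def extend(pat, items):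
--         # lists of increasing indices where pat appears as a subsequence of items
--         if not pat:
--             return [[]]
--         if not items:
--             return []
--         (i, l), rest = items[0], items[1:]
--         here = [[i] + c for c in extend(pat[1:], rest)] if l == pat[0] else []
--         return here + extend(pat, rest)
--
--     def mask(chosen):
--         word = ['-'] * len(s)
--         k = 0
--         for i in chosen:
--             word[i] = pattern[k]
--             k += 1
--         return ''.join(word)
--
--     return {mask(chosen) for chosen in extend(pattern, items)}
-- ===== Notes on version B (the rewrite author's own statement) =====
-- stated objective: faster
-- what changed: A filters every 6-element combination of positions (C(n,6) of them) with a break loop; B recurses over the string guided by the pattern, extending only index prefixes that still match the pattern, so non-matching combinations are never enumerated.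
import Mathlib
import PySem

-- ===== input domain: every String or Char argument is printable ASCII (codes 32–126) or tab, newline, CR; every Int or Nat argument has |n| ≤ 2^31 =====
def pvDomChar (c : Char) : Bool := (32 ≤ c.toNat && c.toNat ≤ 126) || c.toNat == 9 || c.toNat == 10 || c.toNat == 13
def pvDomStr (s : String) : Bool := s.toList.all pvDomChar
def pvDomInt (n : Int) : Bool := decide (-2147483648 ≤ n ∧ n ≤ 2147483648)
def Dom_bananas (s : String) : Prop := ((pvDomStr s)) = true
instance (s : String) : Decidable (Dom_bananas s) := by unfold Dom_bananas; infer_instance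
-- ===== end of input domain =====

-- B replaces A's scan of all 6-index combinations with a pattern-guided recursion that
-- only visits extensible prefixes (objective: faster, asymptotic).

-- ===== PORT A =====
def pvPattern : List Char := ['b', 'a', 'n', 'a', 'n', 'a']

-- itertools.combinations(xs, k), in Python's lexicographic order
def pvCombs {α : Type} : Nat → List α → List (List α)
  | 0, _ => [[]]
  | _ + 1, [] => []
  | k + 1, x :: xs => (pvCombs k xs).map (x :: ·) ++ pvCombs (k + 1) xs

-- A's inner 'for i, letter in combination' loop with the break ('?' is never read:
-- j stays below 6 while items remain, matching Python's pattern[j])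
def pvGoA : List (Int × Char) → Nat → List Char → Nat × List Char
  | [], j, w => (j, w)
  | (i, l) :: rest, j, w =>
      if l = pvPattern.getD j '?' then pvGoA rest (j + 1) (PySem.List.pySetD w i l)
      else (j, w)

def bananas (s : String) : List String :=
  (pvCombs 6 (PySem.List.enumerate s.toList)).foldl
    (fun acc combo =>
      let r := pvGoA combo 0 (List.replicate s.toList.length '-')
      if r.1 = 6 then PySem.Set.add acc (String.ofList r.2) else acc)
    PySem.Set.empty

-- ===== PORT B =====
-- Source B's extend: index lists where pat occurs as a subsequence of the remaining items
def pvExtendB : List Char → List (Int × Char) → List (List Int)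
  | [], _ => [[]]
  | _ :: _, [] => []
  | c :: ps, (i, l) :: rest =>
      (if l = c then (pvExtendB ps rest).map (i :: ·) else []) ++ pvExtendB (c :: ps) rest

-- Source B's mask: write pattern[k] at each chosen index
def pvBuildB : Nat → List Int → List Char → List Char
  | _, [], w => w
  | k, i :: rest, w => pvBuildB (k + 1) rest (PySem.List.pySetD w i (pvPattern.getD k '?'))

def bananas_alt (s : String) : List String :=
  PySem.Set.ofList
    ((pvExtendB pvPattern (PySem.List.enumerate s.toList)).map
      (fun chosen => String.ofList (pvBuildB 0 chosen (List.replicate s.toList.length '-'))))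

-- ===== PRECONDITION & SPEC =====
def Spec_bananas (s : String) (out : List String) : Prop := out = bananas_alt s
instance (s : String) (out : List String) : Decidable (Spec_bananas s out) := by unfold Spec_bananas; infer_instance

-- ===== CLAIM (what is proved, stated in full; the proofs are below) =====
def Claim_equal_bananas : Prop := ∀ (s : String), Dom_bananas s → Spec_bananas s (bananas s)

-- ===== LEMMAS AND PROOFS =====

-- A's fold with its guarded add = fold add over the filterMap-selected masks
theorem pv_fold_add_filterMap (n : Nat) :
    ∀ (L : List (List (Int × Char))) (acc : PySem.Set String),
      L.foldl (fun acc combo =>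
          let r := pvGoA combo 0 (List.replicate n '-')
          if r.1 = 6 then PySem.Set.add acc (String.ofList r.2) else acc) acc
        = (L.filterMap (fun c =>
            if (pvGoA c 0 (List.replicate n '-')).1 = 6 then
              some (String.ofList (pvGoA c 0 (List.replicate n '-')).2) else none)).foldl
            PySem.Set.add acc := by
  intro L
  induction L with
  | nil => intro acc; rfl
  | cons x xs ih =>
      intro acc
      by_cases h : (pvGoA x 0 (List.replicate n '-')).1 = 6 <;> simp [List.foldl, h, ih]

theorem pv_drop_pattern (j : Nat) (hj : j < 6) :
    pvPattern.drop j = pvPattern.getD j '?' :: pvPattern.drop (j + 1) := by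
  interval_cases j <;> rfl

-- main invariant: A's filter over all (6-j)-combinations equals B's guided recursion
theorem pv_main :
    ∀ (es : List (Int × Char)) (j : Nat) (w : List Char), j ≤ 6 →
      (pvCombs (6 - j) es).filterMap
          (fun c => if (pvGoA c j w).1 = 6 then some (String.ofList (pvGoA c j w).2) else none)
        = (pvExtendB (pvPattern.drop j) es).map
            (fun chosen => String.ofList (pvBuildB j chosen w)) := by
  intro es
  induction es with
  | nil =>
      intro j w hj
      rcases Nat.eq_or_lt_of_le hj with h6 | h6
      · subst h6; simp [pvCombs, pvGoA, pvPattern, pvExtendB, pvBuildB]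
      · have hd := pv_drop_pattern j h6
        obtain ⟨m, hm⟩ : ∃ m, 6 - j = m + 1 := ⟨5 - j, by omega⟩
        rw [hm, hd]
        simp [pvCombs, pvExtendB]
  | cons x rest ih =>
      obtain ⟨i, l⟩ := x
      intro j w hj
      rcases Nat.eq_or_lt_of_le hj with h6 | h6
      · subst h6; simp [pvCombs, pvGoA, pvPattern, pvExtendB, pvBuildB]
      · have hd := pv_drop_pattern j h6
        have hm : 6 - j = (6 - (j + 1)) + 1 := by omega
        have ih2 := ih j w hj
        rw [hd] at ih2
        rw [hm, hd]
        show (((pvCombs (6 - (j+1)) rest).map ((i, l) :: ·) ++ pvCombs ((6 - (j+1)) + 1) rest).filterMap _) = _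
        rw [List.filterMap_append, List.filterMap_map]
        rw [← hm] ; rw [ih2]
        by_cases hl : l = pvPattern.getD j '?'
        · have h1 :
              (pvCombs (6 - (j + 1)) rest).filterMap
                  ((fun c => if (pvGoA c j w).1 = 6 then some (String.ofList (pvGoA c j w).2) else none) ∘ ((i, l) :: ·))
                = (pvCombs (6 - (j + 1)) rest).filterMap
                  (fun c => if (pvGoA c (j + 1) (PySem.List.pySetD w i l)).1 = 6 then
                      some (String.ofList (pvGoA c (j + 1) (PySem.List.pySetD w i l)).2) else none) := by
            apply List.filterMap_congr
            intro c _
            simp only [Function.comp_apply, pvGoA, if_pos hl]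
          rw [h1, ih (j + 1) (PySem.List.pySetD w i l) (by omega)]
          simp only [pvExtendB, if_pos hl, List.map_append, List.map_map]
          congr 1
          apply List.map_congr_left
          intro c _
          simp only [Function.comp_apply, pvBuildB]
          rw [← hl]
        · have h1 :
              (pvCombs (6 - (j + 1)) rest).filterMap
                  ((fun c => if (pvGoA c j w).1 = 6 then some (String.ofList (pvGoA c j w).2) else none) ∘ ((i, l) :: ·))
                = [] := by
            apply List.filterMap_eq_nil_iff.mpr
            intro c _
            have hg : pvGoA ((i, l) :: c) j w = (j, w) := by
              simp only [pvGoA]; rw [if_neg hl]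
            rw [Function.comp_apply, hg]
            simp [Nat.ne_of_lt h6]
          rw [h1]
          simp only [pvExtendB, if_neg hl, List.nil_append]

-- ===== VERDICT (by name: the statement is the Claim_ definition above) =====
theorem bananas_spec : Claim_equal_bananas := by
  intro s _
  unfold Spec_bananas bananas bananas_alt
  rw [pv_fold_add_filterMap s.toList.length]
  rw [PySem.Set.ofList_eq_foldl]
  congr 1
  have := pv_main (PySem.List.enumerate s.toList) 0 (List.replicate s.toList.length '-') (by omega)
  simpa using this
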